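-- pv_equiv track=rewrite | github.com/Azure/hpcpack-acm | src/Diagnostics/diags-map-reduce-1.3.x.py | benchmarkCifsParseTaskOutput
-- ===== SOURCE A (Python) =====
-- def benchmarkCifsParseTaskOutput(raw):
--     location = local = toCifs = fromCifs = None
--     try:
--         lines = raw.split('\n')
--         for line in lines:
--             if 'location' in line:
--                 location = line.split(':')[-1][1:-1]
--             if 'copied' in line:
--                 speed = line.split(',')[-1]
--                 if not local:
--                     local = speed
--                     continue
--                 if not toCifs:
--                     toCifs = speed
--                     continue
--                 if not fromCifs:
--                     fromCifs = speed
--                     continue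
--     except:
--         pass
--     return (location, local, toCifs, fromCifs)
-- ===== SOURCE B (Python) =====
-- def benchmarkCifsParseTaskOutput(raw):
--     lines = raw.split('\n')
--     location = None
--     for line in lines:
--         if 'location' in line:
--             location = line.split(':')[-1][1:-1]
--     speeds = [line.split(',')[-1] for line in lines if 'copied' in line]
--     local = toCifs = fromCifs = None
--     for speed in speeds:
--         if not local:
--             local = speed
--         elif not toCifs:
--             toCifs = speed
--         elif not fromCifs:
--             fromCifs = speed
--     return (location, local, toCifs, fromCifs)
-- ===== Notes on version B (the rewrite author's own statement) =====
-- stated objective: simpler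
-- what changed: A's single interleaved scan with a 4-field state (location plus three truthiness-filled speed slots and continue-chains) is decomposed into a location-only pass, a filter/map building the list of 'copied' speeds, and a separate slot-filling fold over that list.
import Mathlib
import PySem

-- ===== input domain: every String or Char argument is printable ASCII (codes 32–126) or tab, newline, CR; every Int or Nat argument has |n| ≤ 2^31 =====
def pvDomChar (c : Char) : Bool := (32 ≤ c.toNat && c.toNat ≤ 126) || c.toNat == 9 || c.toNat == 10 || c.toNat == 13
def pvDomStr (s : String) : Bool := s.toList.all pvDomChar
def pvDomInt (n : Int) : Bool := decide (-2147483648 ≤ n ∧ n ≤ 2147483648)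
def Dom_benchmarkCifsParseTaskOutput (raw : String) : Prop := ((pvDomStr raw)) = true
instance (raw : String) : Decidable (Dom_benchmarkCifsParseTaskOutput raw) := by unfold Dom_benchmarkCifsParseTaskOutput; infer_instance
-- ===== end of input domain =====

-- ===== PORT A =====
-- B changes the decomposition: one interleaved 4-field-state scan becomes a location pass plus a filter/map speeds list folded by a slot-filler (objective: simpler).
-- s.split(sep) for a nonempty literal sep: split? is none only for sep = "", so getD [] is exact here
def pvSplit (s sep : String) : List String := (PySem.Str.split? s sep).getD []
-- line.split(sep)[-1]: split always returns a nonempty list, so [-1] is getLast!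
def pvLastSplit (line sep : String) : String := (pvSplit line sep).getLast!
-- line.split(':')[-1][1:-1]
def pvLoc (line : String) : String := PySem.Str.slice (pvLastSplit line ":") (some 1) (some (-1))
-- Python truthiness of a str-or-None variable: None and '' are falsy
def pvFalsy (o : Option String) : Bool := o == none || o == some ""

def pvAStep (st : Option String × Option String × Option String × Option String) (line : String) :
    Option String × Option String × Option String × Option String :=
  let (loc, lo, tc, fc) := st
  let loc := if PySem.Str.isIn "location" line then some (pvLoc line) else loc
  if PySem.Str.isIn "copied" line then
    let speed := pvLastSplit line ","
    if pvFalsy lo then (loc, some speed, tc, fc)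
    else if pvFalsy tc then (loc, lo, some speed, fc)
    else if pvFalsy fc then (loc, lo, tc, some speed)
    else (loc, lo, tc, fc)
  else (loc, lo, tc, fc)

-- the try/except of A is dead code: no statement in the body can raise
def benchmarkCifsParseTaskOutput (raw : String) : Option String × Option String × Option String × Option String :=
  (pvSplit raw "\n").foldl pvAStep (none, none, none, none)

-- ===== PORT B =====
def pvLocPass (lines : List String) : Option String :=
  lines.foldl (fun loc line => if PySem.Str.isIn "location" line then some (pvLoc line) else loc) none

def pvFill (st : Option String × Option String × Option String) (speed : String) :
    Option String × Option String × Option String :=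
  let (lo, tc, fc) := st
  if pvFalsy lo then (some speed, tc, fc)
  else if pvFalsy tc then (lo, some speed, fc)
  else if pvFalsy fc then (lo, tc, some speed)
  else (lo, tc, fc)

def benchmarkCifsParseTaskOutput_alt (raw : String) : Option String × Option String × Option String × Option String :=
  let lines := pvSplit raw "\n"
  let location := pvLocPass lines
  let speeds := (lines.filter (fun l => PySem.Str.isIn "copied" l)).map (fun l => pvLastSplit l ",")
  let (lo, tc, fc) := speeds.foldl pvFill (none, none, none)
  (location, lo, tc, fc)

-- ===== PRECONDITION & SPEC =====
def Spec_benchmarkCifsParseTaskOutput (raw : String) (out : Option String × Option String × Option String × Option String) : Prop := out = benchmarkCifsParseTaskOutput_alt raw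
instance (raw : String) (out : Option String × Option String × Option String × Option String) : Decidable (Spec_benchmarkCifsParseTaskOutput raw out) := by unfold Spec_benchmarkCifsParseTaskOutput; infer_instance

-- ===== CLAIM =====
def Claim_equal_benchmarkCifsParseTaskOutput : Prop := ∀ (raw : String), Dom_benchmarkCifsParseTaskOutput raw → Spec_benchmarkCifsParseTaskOutput raw (benchmarkCifsParseTaskOutput raw)

-- ===== LEMMAS AND PROOFS =====
-- the interleaved scan of A is the location fold paired with the slot-fill fold over the copied speeds
theorem pvFold_split (lines : List String) (loc : Option String)
    (s : Option String × Option String × Option String) :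
    lines.foldl pvAStep (loc, s) =
      (lines.foldl (fun loc line => if PySem.Str.isIn "location" line then some (pvLoc line) else loc) loc,
       ((lines.filter (fun l => PySem.Str.isIn "copied" l)).map (fun l => pvLastSplit l ",")).foldl pvFill s) := by
  induction lines generalizing loc s with
  | nil => rfl
  | cons line rest ih =>
    obtain ⟨lo, tc, fc⟩ := s
    simp only [List.foldl_cons, List.filter_cons, List.map]
    by_cases hc : PySem.Str.isIn "copied" line
    · simp only [hc, if_true, pvAStep]
      split_ifs <;> simp_all [ih, pvFill]
    · simp only [hc, if_false, pvAStep]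
      simp_all [ih]

-- ===== VERDICT =====
theorem benchmarkCifsParseTaskOutput_spec : Claim_equal_benchmarkCifsParseTaskOutput := by
  intro raw _
  show _ = _
  unfold benchmarkCifsParseTaskOutput benchmarkCifsParseTaskOutput_alt pvLocPass
  rw [pvFold_split]
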